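-- pv_equiv track=rewrite | github.com/mits-pl/wove | bench/wove_agent.py | _extract_error_summary
-- ===== SOURCE A (Python) =====
-- def _extract_error_summary(test_output: str) -> str:
--     """Extract a concise error summary from test output."""
--     lines = test_output.strip().split("\n")
--     # Look for common failure patterns
--     for line in reversed(lines):
--         line = line.strip()
--         if any(kw in line.lower() for kw in [
--             "assert", "error", "failed", "not found", "no such",
--             "permission denied", "timeout", "import", "syntax",
--         ]):
--             return line[:150]
--     # Fallback: last non-empty line
--     for line in reversed(lines):
--         if line.strip():
--             return line.strip()[:150]
--     return ""
-- ===== SOURCE B (Python) =====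
-- def _extract_error_summary(test_output: str) -> str:
--     """Extract a concise error summary from test output (single forward pass)."""
--     keywords = ("assert", "error", "failed", "not found", "no such",
--                 "permission denied", "timeout", "import", "syntax")
--     last_match = None
--     last_nonempty = None
--     for raw in test_output.strip().split("\n"):
--         line = raw.strip()
--         if any(kw in line.lower() for kw in keywords):
--             last_match = line
--         if line:
--             last_nonempty = line
--     if last_match is not None:
--         return last_match[:150]
--     if last_nonempty is not None:
--         return last_nonempty[:150]
--     return ""
-- ===== Notes on version B (the rewrite author's own statement) =====
-- stated objective: alternative
-- what changed: Replaces A's two reversed early-return scans by a single forward pass that overwrites last_match / last_nonempty (stripped) on each hit, then picks the result after the loop.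
import Mathlib
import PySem

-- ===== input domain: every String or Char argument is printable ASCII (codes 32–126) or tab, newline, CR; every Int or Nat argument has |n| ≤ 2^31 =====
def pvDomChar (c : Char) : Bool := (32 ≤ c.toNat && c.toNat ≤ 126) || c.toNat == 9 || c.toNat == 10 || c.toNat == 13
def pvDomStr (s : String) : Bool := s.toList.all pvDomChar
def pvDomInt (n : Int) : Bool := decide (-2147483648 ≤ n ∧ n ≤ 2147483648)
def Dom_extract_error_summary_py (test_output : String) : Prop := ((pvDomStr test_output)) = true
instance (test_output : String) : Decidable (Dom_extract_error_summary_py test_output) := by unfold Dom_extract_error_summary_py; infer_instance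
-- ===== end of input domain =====

-- B replaces A's two reversed early-return scans by one forward pass keeping the last
-- keyword-matching and last non-empty stripped line (objective: alternative decomposition).


-- shared constant: the keyword list from the Python source (identical in A and B)
def pvKeywords : List (List Char) :=
  ["assert".toList, "error".toList, "failed".toList, "not found".toList, "no such".toList,
   "permission denied".toList, "timeout".toList, "import".toList, "syntax".toList]

-- any(kw in line.lower() for kw in [...])
def pvKwMatch (line : List Char) : Bool :=
  pvKeywords.any (fun kw => PySem.Chars.isIn kw (PySem.Chars.lower line))

-- ===== PORT A =====
def extract_error_summary_py (test_output : String) : String :=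
  let lines := PySem.Chars.splitOn (PySem.Chars.strip test_output.toList) ['\n']
  -- first loop: for line in reversed(lines): line = line.strip(); if any(...): return line[:150]
  match lines.reverse.find? (fun l => pvKwMatch (PySem.Chars.strip l)) with
  | some l => String.ofList (PySem.List.slice (PySem.Chars.strip l) none (some 150))
  | none =>
    -- second loop: for line in reversed(lines): if line.strip(): return line.strip()[:150]
    match lines.reverse.find? (fun l => !(PySem.Chars.strip l).isEmpty) with
    | some l => String.ofList (PySem.List.slice (PySem.Chars.strip l) none (some 150))
    | none => ""

-- ===== PORT B =====
def extract_error_summary_py_alt (test_output : String) : String :=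
  let lines := PySem.Chars.splitOn (PySem.Chars.strip test_output.toList) ['\n']
  let st := lines.foldl
    (fun (acc : Option (List Char) × Option (List Char)) raw =>
      let line := PySem.Chars.strip raw
      (if pvKwMatch line then some line else acc.1,
       if !line.isEmpty then some line else acc.2))
    (none, none)
  match st.1 with
  | some line => String.ofList (PySem.List.slice line none (some 150))
  | none =>
    match st.2 with
    | some line => String.ofList (PySem.List.slice line none (some 150))
    | none => ""

-- ===== PRECONDITION & SPEC =====
def Spec_extract_error_summary_py (test_output : String) (out : String) : Prop := out = extract_error_summary_py_alt test_output
instance (test_output : String) (out : String) : Decidable (Spec_extract_error_summary_py test_output out) := by unfold Spec_extract_error_summary_py; infer_instance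

-- ===== CLAIM (what is proved, stated in full; the proofs are below) =====
def Claim_equal_extract_error_summary_py : Prop := ∀ (test_output : String), Dom_extract_error_summary_py test_output → Spec_extract_error_summary_py test_output (extract_error_summary_py test_output)

-- ===== LEMMAS AND PROOFS =====

-- a forward "overwrite on hit" fold computes the last hit, i.e. the first hit of the reversed list
theorem pv_foldl_last {α : Type} (p : α → Bool) (xs : List α) (init : Option α) :
    xs.foldl (fun acc x => if p x then some x else acc) init = (xs.reverse.find? p).or init := by
  induction xs generalizing init with
  | nil => simp
  | cons x xs ih =>
    simp only [List.foldl_cons, ih, List.reverse_cons, List.find?_append]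
    cases xs.reverse.find? p with
    | some y => simp [Option.or]
    | none => cases hp : p x <;> simp [Option.or, hp]

-- forward fold of "overwrite with the STRIPPED line on hit" = strip of A's reversed find?
theorem pv_foldl_strip_last (p : List Char → Bool) (ls : List (List Char)) :
    ls.foldl (fun acc raw => if p (PySem.Chars.strip raw) then some (PySem.Chars.strip raw) else acc) none
      = (ls.reverse.find? (fun l => p (PySem.Chars.strip l))).map PySem.Chars.strip := by
  have h := pv_foldl_last p (ls.map PySem.Chars.strip) none
  rw [List.foldl_map] at h
  rw [h, Option.or_none, ← List.map_reverse, List.find?_map]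
  rfl

theorem extract_error_summary_py_eq (test_output : String) :
    extract_error_summary_py test_output = extract_error_summary_py_alt test_output := by
  unfold extract_error_summary_py extract_error_summary_py_alt
  simp only
  rw [PySem.List.foldl_prod_mk
        (f := fun (m : Option (List Char)) raw =>
          if pvKwMatch (PySem.Chars.strip raw) then some (PySem.Chars.strip raw) else m)
        (g := fun (n : Option (List Char)) raw =>
          if !(PySem.Chars.strip raw).isEmpty then some (PySem.Chars.strip raw) else n)]
  rw [pv_foldl_strip_last pvKwMatch, pv_foldl_strip_last (fun s => !s.isEmpty)]
  cases (PySem.Chars.splitOn (PySem.Chars.strip test_output.toList) ['\n']).reverse.find?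
      (fun l => pvKwMatch (PySem.Chars.strip l)) with
  | some l => rfl
  | none =>
    simp only [Option.map_none]
    cases (PySem.Chars.splitOn (PySem.Chars.strip test_output.toList) ['\n']).reverse.find?
        (fun l => !(PySem.Chars.strip l).isEmpty) with
    | some l => rfl
    | none => rfl

-- ===== VERDICT (by name: the statement is the Claim_ definition above) =====
theorem extract_error_summary_py_spec : Claim_equal_extract_error_summary_py := by
  intro t _
  exact extract_error_summary_py_eq t
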